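-- pv_equiv track=rewrite | github.com/harikrish138/SecondPracticeProject | Programs/reverse_list_sep_alpha_digit.py | rev_digit_char
-- ===== SOURCE A (Python) =====
-- def rev_digit_char(lst):
--     char=[]
--     digits=[]
--     for i in lst:
--         if i.isalpha():
--             o=''
--             for j in range(len(i)-1,-1,-1):
--                 o+=i[j]
--             char.append(o)
--         else:
--             l=''
--             for j in range(len(i)-1,-1,-1):
--                 l+=i[j]
--             digits.append(l)
--     return char,digits
-- ===== SOURCE B (Python) =====
-- def rev_digit_char(lst):
--     rev = [s[::-1] for s in lst]
--     char = [s for s in rev if s.isalpha()]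
--     digits = [s for s in rev if not s.isalpha()]
--     return char, digits
-- ===== Notes on version B (the rewrite author's own statement) =====
-- stated objective: simpler
-- what changed: A's single pass with a conditional-append accumulator and a hand-written index countdown per string is replaced by building the reversed strings once via slicing (s[::-1]) and then deriving the two outputs with two separate filter comprehensions on isalpha.
import Mathlib
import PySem

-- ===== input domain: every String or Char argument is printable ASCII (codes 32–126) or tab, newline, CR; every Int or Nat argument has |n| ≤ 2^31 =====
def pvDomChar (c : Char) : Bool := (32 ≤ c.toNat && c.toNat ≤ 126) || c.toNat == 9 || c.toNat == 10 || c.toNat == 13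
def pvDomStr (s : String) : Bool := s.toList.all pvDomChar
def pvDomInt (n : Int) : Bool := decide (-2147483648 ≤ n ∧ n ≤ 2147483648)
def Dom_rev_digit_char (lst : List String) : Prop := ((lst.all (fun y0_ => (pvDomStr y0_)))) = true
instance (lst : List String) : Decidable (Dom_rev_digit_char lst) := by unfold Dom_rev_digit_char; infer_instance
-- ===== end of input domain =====

-- B builds the list of reversed strings first (s[::-1]) and then derives the two outputs
-- by two separate filter passes on isalpha; objective: simpler.

-- ===== PORT A =====
-- A's inner loop: 'o = ""; for j in range(len(i)-1,-1,-1): o += i[j]'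
def revLoopA (s : String) : String :=
  (PySem.List.pyRange ((PySem.Str.len s : Int) - 1) (-1) (-1)).foldl
    (fun o j =>
      match PySem.Str.pyGet? s j with
      | some c => o.push c
      | none => o) ""

def rev_digit_char (lst : List String) : List String × List String :=
  lst.foldl
    (fun (acc : List String × List String) i =>
      if PySem.Str.strIsalpha i then
        (acc.1 ++ [revLoopA i], acc.2)
      else
        (acc.1, acc.2 ++ [revLoopA i]))
    ([], [])

-- ===== PORT B =====
def rev_digit_char_alt (lst : List String) : List String × List String :=
  let rev := lst.map (fun s => (PySem.Str.slice? s none none (-1)).getD "")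
  (rev.filter (fun s => PySem.Str.strIsalpha s),
   rev.filter (fun s => !PySem.Str.strIsalpha s))

-- ===== PRECONDITION & SPEC =====
def Spec_rev_digit_char (lst : List String) (out : List String × List String) : Prop := out = rev_digit_char_alt lst
instance (lst : List String) (out : List String × List String) : Decidable (Spec_rev_digit_char lst out) := by unfold Spec_rev_digit_char; infer_instance

-- ===== CLAIM (what is proved, stated in full; the proofs are below) =====
def Claim_equal_rev_digit_char : Prop := ∀ (lst : List String), Dom_rev_digit_char lst → Spec_rev_digit_char lst (rev_digit_char lst)

-- ===== LEMMAS AND PROOFS =====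

-- A's countdown loop over indices k-1 … 0 appends the reversed take k to the accumulator
theorem revLoopA_aux (cs : List Char) (k : Nat) (hk : k ≤ cs.length) (acc : String) :
    (PySem.List.pyRange ((k : Int) - 1) (-1) (-1)).foldl
      (fun o j =>
        match PySem.List.pyGet? cs j with
        | some c => o.push c
        | none => o) acc = acc ++ String.ofList (cs.take k).reverse := by
  induction k generalizing acc with
  | zero =>
    rw [PySem.List.pyRange_neg_one_eq_nil (by omega)]
    apply String.toList_inj.mp; simp
  | succ n ih =>
    have hn : n < cs.length := by omega
    rw [show ((n + 1 : Nat) : Int) - 1 = (n : Int) from by push_cast; ring,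
        PySem.List.pyRange_neg_one_cons (by omega)]
    simp only [List.foldl_cons]
    have hget : PySem.List.pyGet? cs (n : Int) = some cs[n] := by
      simp [hn]
    rw [hget, ih (by omega)]
    apply String.toList_inj.mp
    have ht : cs.take (n + 1) = cs.take n ++ [cs[n]] := by
      rw [List.take_add_one]; simp [List.getElem?_eq_getElem hn]
    rw [ht]
    simp only [String.toList_append, String.toList_push, String.toList_ofList,
      List.reverse_append, List.reverse_cons, List.reverse_nil, List.nil_append,
      List.cons_append, List.append_assoc]

theorem revLoopA_eq (s : String) : revLoopA s = String.ofList s.toList.reverse := by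
  unfold revLoopA
  have h := revLoopA_aux s.toList s.toList.length le_rfl ""
  simp only [List.take_length] at h
  have hlen : (PySem.Str.len s : Int) = (s.toList.length : Int) := by
    simp [PySem.Str.len]
  have hget : ∀ j, PySem.Str.pyGet? s j = PySem.List.pyGet? s.toList j := by
    intro j; simp [PySem.Str.pyGet?]
  rw [hlen]
  simp only [hget]
  rw [h]
  apply String.toList_inj.mp; simp

theorem strIsalpha_rev (s : String) :
    PySem.Str.strIsalpha (String.ofList s.toList.reverse) = PySem.Str.strIsalpha s := by
  simp [PySem.Str.strIsalpha, PySem.Chars.strIsalpha]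

theorem main_aux (lst : List String) (c d : List String) :
    lst.foldl
      (fun (acc : List String × List String) i =>
        if PySem.Str.strIsalpha i then
          (acc.1 ++ [revLoopA i], acc.2)
        else
          (acc.1, acc.2 ++ [revLoopA i]))
      (c, d)
    = (c ++ (lst.map revLoopA).filter (fun s => PySem.Str.strIsalpha s),
       d ++ (lst.map revLoopA).filter (fun s => !PySem.Str.strIsalpha s)) := by
  induction lst generalizing c d with
  | nil => simp
  | cons x xs ih =>
    simp only [List.foldl_cons, List.map_cons, List.filter_cons]
    have hx : PySem.Str.strIsalpha (revLoopA x) = PySem.Str.strIsalpha x := by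
      rw [revLoopA_eq]; exact strIsalpha_rev x
    by_cases h : PySem.Str.strIsalpha x = true
    · rw [if_pos h, ih, hx, h]
      simp
    · rw [if_neg h, ih, hx]
      simp only [Bool.not_eq_true] at h
      rw [h]
      simp

-- ===== VERDICT (by name: the statement is the Claim_ definition above) =====
theorem rev_digit_char_spec : Claim_equal_rev_digit_char := by
  intro lst _
  unfold Spec_rev_digit_char rev_digit_char rev_digit_char_alt
  have hf : (fun s => (PySem.Str.slice? s none none (-1)).getD "") = revLoopA := by
    funext s
    rw [PySem.Str.slice?_none_none_neg_one, Option.getD_some, revLoopA_eq]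
  simp only [hf]
  exact main_aux lst [] []
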